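-- pv_equiv track=rewrite | github.com/Glocker134/CS50-projects | lesson_6/credit.py | master_check
-- ===== SOURCE A (Python) =====
-- def master_check(card, count):
--     if card // 10 > 9 and count < 14:
--         return master_check(card // 10, count + 1)
--     else:
--         aux = card % 10
--         aux2 = (card // 10) * 10
--         ans = aux + aux2
--         if ans >= 51 and ans <= 55:
--             return True
--         else:
--             return False
-- ===== SOURCE B (Python) =====
-- def master_check(card, count):
--     # Iterative: strip trailing digits (capped at 14 steps), then range-check.
--     while card // 10 > 9 and count < 14:
--         card //= 10
--         count += 1
--     return 51 <= card <= 55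
-- ===== Notes on version B (the rewrite author's own statement) =====
-- stated objective: simpler
-- what changed: Tail recursion replaced by an iterative while loop, and the terminal aux + (card//10)*10 arithmetic (which always equals card itself) replaced by a direct chained comparison 51 <= card <= 55.
import Mathlib
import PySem

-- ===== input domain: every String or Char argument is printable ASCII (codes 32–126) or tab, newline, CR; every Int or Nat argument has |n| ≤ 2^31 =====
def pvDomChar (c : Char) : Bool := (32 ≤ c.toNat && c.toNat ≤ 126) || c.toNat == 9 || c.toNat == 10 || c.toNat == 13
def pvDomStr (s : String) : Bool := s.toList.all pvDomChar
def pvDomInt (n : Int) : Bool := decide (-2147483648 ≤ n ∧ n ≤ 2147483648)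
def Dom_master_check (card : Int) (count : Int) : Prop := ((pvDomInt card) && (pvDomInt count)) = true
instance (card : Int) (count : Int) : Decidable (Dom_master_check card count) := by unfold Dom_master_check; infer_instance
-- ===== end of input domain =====

-- B replaces A's tail recursion by an iterative loop and the terminal aux-sum by a direct 51..55 check; objective: simpler.

-- ===== PORT A =====
def master_check (card : Int) (count : Int) : Bool :=
  if PySem.Int.floordiv card 10 > 9 ∧ count < 14 then
    master_check (PySem.Int.floordiv card 10) (count + 1)
  else
    let aux := PySem.Int.mod card 10
    let aux2 := (PySem.Int.floordiv card 10) * 10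
    let ans := aux + aux2
    if ans ≥ 51 ∧ ans ≤ 55 then true else false
termination_by card.toNat
decreasing_by
  rename_i h
  have h10 : (0:Int) < 10 := by norm_num
  rw [PySem.Int.floordiv_eq_ediv_of_pos h10] at *
  omega

-- ===== PORT B =====
-- the while loop of Source B, as structural recursion on the same state
def master_check_alt_loop (card : Int) (count : Int) : Int :=
  if PySem.Int.floordiv card 10 > 9 ∧ count < 14 then
    master_check_alt_loop (PySem.Int.floordiv card 10) (count + 1)
  else card
termination_by card.toNat
decreasing_by
  rename_i h
  have h10 : (0:Int) < 10 := by norm_num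
  rw [PySem.Int.floordiv_eq_ediv_of_pos h10] at *
  omega

def master_check_alt (card : Int) (count : Int) : Bool :=
  let c := master_check_alt_loop card count
  decide (51 ≤ c ∧ c ≤ 55)

-- ===== PRECONDITION & SPEC =====
def Spec_master_check (card : Int) (count : Int) (out : Bool) : Prop := out = master_check_alt card count
instance (card : Int) (count : Int) (out : Bool) : Decidable (Spec_master_check card count out) := by unfold Spec_master_check; infer_instance

-- ===== CLAIM (what is proved, stated in full; the proofs are below) =====
def Claim_equal_master_check : Prop := ∀ (card : Int) (count : Int), Dom_master_check card count → Spec_master_check card count (master_check card count)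

-- ===== LEMMAS AND PROOFS =====
theorem master_check_eq_alt (card count : Int) :
    master_check card count = master_check_alt card count := by
  induction card, count using master_check.induct with
  | case1 card count h ih =>
      rw [master_check, master_check_alt, master_check_alt_loop, if_pos h, if_pos h]
      rw [ih, master_check_alt]
  | case2 card count h aux aux2 ans h2 =>
      rw [master_check, master_check_alt, master_check_alt_loop, if_neg h, if_neg h]
      have hsplit : PySem.Int.floordiv card 10 * 10 + PySem.Int.mod card 10 = card :=
        PySem.Int.floordiv_mul_add_mod card 10
      dsimp only
      rw [if_pos h2]
      symm; rw [decide_eq_true_eq]; omega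
  | case3 card count h aux aux2 ans h2 =>
      rw [master_check, master_check_alt, master_check_alt_loop, if_neg h, if_neg h]
      have hsplit : PySem.Int.floordiv card 10 * 10 + PySem.Int.mod card 10 = card :=
        PySem.Int.floordiv_mul_add_mod card 10
      dsimp only
      rw [if_neg h2]
      symm; rw [decide_eq_false_iff_not]; omega

-- ===== VERDICT (by name: the statement is the Claim_ definition above) =====
theorem master_check_spec : Claim_equal_master_check := by
  intro card count _
  exact master_check_eq_alt card count
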